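-- pv_equiv track=rewrite | github.com/chikocharles/WebScraper | web_scraper_clean.py | classify_job_category
-- ===== SOURCE A (Python) =====
-- def classify_job_category(title, description, company):
--     """Classify job into categories based on title, description, and company."""
--     title_lower = title.lower()
--     description_lower = description.lower()
--     company_lower = company.lower()
--
--     # Define category keywords
--     categories = {
--         "Healthcare": [
--             "nurse", "doctor", "medical", "health", "hospital", "clinic", "pharmacy", "pharmacist",
--             "therapist", "healthcare", "dentist", "physician", "clinical", "patient", "treatment",
--             "medical officer", "health officer", "nursing", "midwife", "radiographer", "lab technician"
--         ],
--         "IT & Technology": [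
--             "developer", "programmer", "software", "IT", "system", "network", "database", "web",
--             "technology", "computer", "digital", "cyber", "data", "analyst", "technical", "engineer",
--             "coding", "programming", "javascript", "python", "java", "html", "css"
--         ],
--         "Education & Training": [
--             "teacher", "instructor", "education", "training", "academic", "school", "university",
--             "lecturer", "professor", "tutor", "educational", "curriculum", "learning", "student",
--             "teaching", "trainer", "facilitator"
--         ],
--         "Finance & Banking": [
--             "accountant", "finance", "banking", "financial", "audit", "budget", "accounting",
--             "economist", "treasurer", "cashier", "credit", "loan", "investment", "tax",
--             "bookkeeper", "payroll"
--         ],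
--         "Sales & Marketing": [
--             "sales", "marketing", "market", "customer", "client", "business development", "promotion",
--             "advertising", "brand", "retail", "commercial", "revenue", "target", "campaign"
--         ],
--         "Human Resources": [
--             "human resources", "HR", "recruitment", "talent", "personnel", "employee", "payroll",
--             "benefits", "compensation", "training coordinator", "people", "workforce"
--         ],
--         "Engineering": [
--             "engineer", "engineering", "mechanical", "electrical", "civil", "construction", "architect",
--             "technical", "maintenance", "repair", "installation", "infrastructure", "project engineer"
--         ],
--         "Administration": [
--             "administrator", "admin", "secretary", "clerk", "assistant", "receptionist", "office",
--             "administrative", "coordinator", "support", "data entry", "filing"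
--         ],
--         "Management": [
--             "manager", "director", "supervisor", "head", "chief", "executive", "leadership", "team lead",
--             "senior", "management", "operations", "strategic", "planning", "CEO", "COO", "CFO"
--         ],
--         "Agriculture": [
--             "agriculture", "farming", "farmer", "agricultural", "crop", "livestock", "veterinary",
--             "agronomy", "irrigation", "rural", "extension officer"
--         ],
--         "Legal": [
--             "lawyer", "legal", "attorney", "law", "court", "judicial", "legal officer", "paralegal",
--             "compliance", "contract", "litigation"
--         ],
--         "NGO & Development": [
--             "NGO", "development", "community", "social", "humanitarian", "volunteer", "nonprofit",
--             "charity", "aid", "relief", "donor", "grant", "project officer"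
--         ],
--         "Consulting": [
--             "consultant", "consulting", "advisory", "expert", "specialist", "freelance", "contractor",
--             "consultancy", "expertise"
--         ],
--         "Transportation & Logistics": [
--             "driver", "transport", "logistics", "delivery", "shipping", "warehouse", "supply chain",
--             "distribution", "fleet", "cargo"
--         ],
--         "Security": [
--             "security", "guard", "protection", "safety", "surveillance", "risk", "emergency"
--         ],
--         "Other": []  # Default category
--     }
--
--     # Check each category
--     for category, keywords in categories.items():
--         if category == "Other":
--             continue
--
--         for keyword in keywords:
--             if (keyword in title_lower or
--                 keyword in description_lower or
--                 keyword in company_lower):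
--                 return category
--
--     return "Other"
-- ===== SOURCE B (Python) =====
-- # B: single position-major scan over the combined text with a keyword->category
-- # hash index, instead of A's keyword-major loop of ~200 substring scans.
--
-- _CATEGORY_NAMES = ['Healthcare', 'IT & Technology', 'Education & Training', 'Finance & Banking', 'Sales & Marketing', 'Human Resources', 'Engineering', 'Administration', 'Management', 'Agriculture', 'Legal', 'NGO & Development', 'Consulting', 'Transportation & Logistics', 'Security', 'Other']
--
-- _CATEGORY_KEYWORDS = [['nurse', 'doctor', 'medical', 'health', 'hospital', 'clinic', 'pharmacy', 'pharmacist', 'therapist', 'healthcare', 'dentist', 'physician', 'clinical', 'patient', 'treatment', 'medical officer', 'health officer', 'nursing', 'midwife', 'radiographer', 'lab technician'], ['developer', 'programmer', 'software', 'IT', 'system', 'network', 'database', 'web', 'technology', 'computer', 'digital', 'cyber', 'data', 'analyst', 'technical', 'engineer', 'coding', 'programming', 'javascript', 'python', 'java', 'html', 'css'], ['teacher', 'instructor', 'education', 'training', 'academic', 'school', 'university', 'lecturer', 'professor', 'tutor', 'educational', 'curriculum', 'learning', 'student', 'teaching', 'trainer', 'facilitator'], ['accountant', 'finance', 'banking',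 'financial', 'audit', 'budget', 'accounting', 'economist', 'treasurer', 'cashier', 'credit', 'loan', 'investment', 'tax', 'bookkeeper', 'payroll'], ['sales', 'marketing', 'market', 'customer', 'client', 'business development', 'promotion', 'advertising', 'brand', 'retail', 'commercial', 'revenue', 'target', 'campaign'], ['human resources', 'HR', 'recruitment', 'talent', 'personnel', 'employee', 'payroll', 'benefits', 'compensation', 'training coordinator', 'people', 'workforce'], ['engineer', 'engineering', 'mechanical', 'electrical', 'civil', 'construction', 'architect', 'technical', 'maintenance', 'repair', 'installation', 'infrastructure', 'project engineer'], ['administrator', 'admin', 'secretary', 'clerk', 'assistant', 'receptionist', 'office', 'administrative', 'coordinator', 'support', 'data entry', 'filing'], ['manager', 'director', 'supervisor', 'head', 'chief', 'executive', 'leadership', 'team lead', 'senior', 'management', 'operations', 'strategic', 'planning', 'CEO', 'COO', 'CFO'], ['agriculture', 'farming', 'farmer', 'agricultural', 'crop', 'livestock', 'veterinary', 'agronomy', 'irrigation', 'rural', 'extension officer'], ['lawyer', 'legal', 'attorney', 'law', 'court', 'judicial', 'legal officer', 'paralegal', 'compliance', 'contract', 'litigation'], ['NGO', 'development', 'community',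 'social', 'humanitarian', 'volunteer', 'nonprofit', 'charity', 'aid', 'relief', 'donor', 'grant', 'project officer'], ['consultant', 'consulting', 'advisory', 'expert', 'specialist', 'freelance', 'contractor', 'consultancy', 'expertise'], ['driver', 'transport', 'logistics', 'delivery', 'shipping', 'warehouse', 'supply chain', 'distribution', 'fleet', 'cargo'], ['security', 'guard', 'protection', 'safety', 'surveillance', 'risk', 'emergency']]
--
-- # keyword -> index of its earliest category (first occurrence wins)
-- _KW_INDEX = {}
-- for _ci, _kws in enumerate(_CATEGORY_KEYWORDS):
--     for _kw in _kws:
--         if _kw not in _KW_INDEX: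
--             _KW_INDEX[_kw] = _ci
--
-- _KW_LENGTHS = sorted({len(_kw) for _kw in _KW_INDEX})
--
--
-- def classify_job_category(title, description, company):
--     # '\n' occurs in no keyword, so joining cannot create a spurious match
--     text = "\n".join((title.lower(), description.lower(), company.lower()))
--     best = 15  # index of "Other"
--     get = _KW_INDEX.get
--     for i in range(len(text)):
--         if best == 0:
--             break
--         for L in _KW_LENGTHS:
--             ci = get(text[i:i + L])
--             if ci is not None and ci < best:
--                 best = ci
--     return _CATEGORY_NAMES[best]
-- ===== Notes on version B (the rewrite author's own statement) =====
-- stated objective: alternative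
-- what changed: A runs a keyword-major cascade of ~200 independent substring scans over the three lowered fields; B joins the three lowered fields with a '\n' separator (which occurs in no keyword) and makes one position-major scan over the joined text, probing a precomputed keyword->earliest-category hash index at each position (one probe per distinct keyword length), then returns the category with the minimal matched index.
import Mathlib
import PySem

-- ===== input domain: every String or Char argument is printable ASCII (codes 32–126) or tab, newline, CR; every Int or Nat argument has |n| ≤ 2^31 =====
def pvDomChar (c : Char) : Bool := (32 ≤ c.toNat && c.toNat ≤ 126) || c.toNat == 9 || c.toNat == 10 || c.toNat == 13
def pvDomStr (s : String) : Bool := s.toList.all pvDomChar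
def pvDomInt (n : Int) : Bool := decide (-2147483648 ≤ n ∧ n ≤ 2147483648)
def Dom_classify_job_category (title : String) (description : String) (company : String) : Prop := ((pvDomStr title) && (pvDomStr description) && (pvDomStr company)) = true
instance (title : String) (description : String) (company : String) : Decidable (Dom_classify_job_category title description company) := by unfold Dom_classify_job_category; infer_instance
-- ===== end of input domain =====

-- B re-implements A's keyword-major cascade of ~200 substring scans as ONE position-major
-- scan over the joined lowered text with a keyword→category index (earliest category wins);
-- same return value on every input (objective: alternative algorithm).

-- ===== PORT A =====
def pvCatList : List (String × List String) := [
  ("Healthcare", ["nurse", "doctor", "medical", "health", "hospital", "clinic", "pharmacy", "pharmacist", "therapist", "healthcare", "dentist", "physician", "clinical", "patient", "treatment", "medical officer", "health officer", "nursing", "midwife", "radiographer", "lab technician"]),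
  ("IT & Technology", ["developer", "programmer", "software", "IT", "system", "network", "database", "web", "technology", "computer", "digital", "cyber", "data", "analyst", "technical", "engineer", "coding", "programming", "javascript", "python", "java", "html", "css"]),
  ("Education & Training", ["teacher", "instructor", "education", "training", "academic", "school", "university", "lecturer", "professor", "tutor", "educational", "curriculum", "learning", "student", "teaching", "trainer", "facilitator"]),
  ("Finance & Banking", ["accountant", "finance", "banking", "financial", "audit", "budget", "accounting", "economist", "treasurer", "cashier", "credit", "loan", "investment", "tax", "bookkeeper", "payroll"]),
  ("Sales & Marketing", ["sales", "marketing", "market", "customer", "client", "business development", "promotion", "advertising", "brand", "retail", "commercial", "revenue", "target", "campaign"]),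
  ("Human Resources", ["human resources", "HR", "recruitment", "talent", "personnel", "employee", "payroll", "benefits", "compensation", "training coordinator", "people", "workforce"]),
  ("Engineering", ["engineer", "engineering", "mechanical", "electrical", "civil", "construction", "architect", "technical", "maintenance", "repair", "installation", "infrastructure", "project engineer"]),
  ("Administration", ["administrator", "admin", "secretary", "clerk", "assistant", "receptionist", "office", "administrative", "coordinator", "support", "data entry", "filing"]),
  ("Management", ["manager", "director", "supervisor", "head", "chief", "executive", "leadership", "team lead", "senior", "management", "operations", "strategic", "planning", "CEO", "COO", "CFO"]),
  ("Agriculture", ["agriculture", "farming", "farmer", "agricultural", "crop", "livestock", "veterinary", "agronomy", "irrigation", "rural", "extension officer"]),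
  ("Legal", ["lawyer", "legal", "attorney", "law", "court", "judicial", "legal officer", "paralegal", "compliance", "contract", "litigation"]),
  ("NGO & Development", ["NGO", "development", "community", "social", "humanitarian", "volunteer", "nonprofit", "charity", "aid", "relief", "donor", "grant", "project officer"]),
  ("Consulting", ["consultant", "consulting", "advisory", "expert", "specialist", "freelance", "contractor", "consultancy", "expertise"]),
  ("Transportation & Logistics", ["driver", "transport", "logistics", "delivery", "shipping", "warehouse", "supply chain", "distribution", "fleet", "cargo"]),
  ("Security", ["security", "guard", "protection", "safety", "surveillance", "risk", "emergency"]),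
  ("Other", [])]
-- inner 'for keyword in keywords: if ... : return category' — true = some keyword hits
def pvAnyHit : List String → String → String → String → Bool
  | [], _, _, _ => false
  | kw :: rest, tl, dl, cl =>
      if PySem.Str.isIn kw tl || PySem.Str.isIn kw dl || PySem.Str.isIn kw cl then true
      else pvAnyHit rest tl dl cl

-- outer 'for category, keywords in categories.items()' with the "Other" continue
def pvLoopA : List (String × List String) → String → String → String → String
  | [], _, _, _ => "Other"
  | (cat, kws) :: rest, tl, dl, cl =>
      if cat == "Other" then pvLoopA rest tl dl cl
      else if pvAnyHit kws tl dl cl then cat else pvLoopA rest tl dl cl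

def classify_job_category (title : String) (description : String) (company : String) : String :=
  pvLoopA pvCatList (PySem.Str.lower title) (PySem.Str.lower description) (PySem.Str.lower company)

-- ===== PORT B =====
def pvNames : List String := ["Healthcare", "IT & Technology", "Education & Training", "Finance & Banking", "Sales & Marketing", "Human Resources", "Engineering", "Administration", "Management", "Agriculture", "Legal", "NGO & Development", "Consulting", "Transportation & Logistics", "Security", "Other"]
-- _CATEGORY_KEYWORDS: each Python str given as the List Char it denotes (the form the
-- position-major scanner consumes)
def pvCatKws : List (List (List Char)) := [
  [['n', 'u', 'r', 's', 'e'],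
   ['d', 'o', 'c', 't', 'o', 'r'],
   ['m', 'e', 'd', 'i', 'c', 'a', 'l'],
   ['h', 'e', 'a', 'l', 't', 'h'],
   ['h', 'o', 's', 'p', 'i', 't', 'a', 'l'],
   ['c', 'l', 'i', 'n', 'i', 'c'],
   ['p', 'h', 'a', 'r', 'm', 'a', 'c', 'y'],
   ['p', 'h', 'a', 'r', 'm', 'a', 'c', 'i', 's', 't'],
   ['t', 'h', 'e', 'r', 'a', 'p', 'i', 's', 't'],
   ['h', 'e', 'a', 'l', 't', 'h', 'c', 'a', 'r', 'e'],
   ['d', 'e', 'n', 't', 'i', 's', 't'],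
   ['p', 'h', 'y', 's', 'i', 'c', 'i', 'a', 'n'],
   ['c', 'l', 'i', 'n', 'i', 'c', 'a', 'l'],
   ['p', 'a', 't', 'i', 'e', 'n', 't'],
   ['t', 'r', 'e', 'a', 't', 'm', 'e', 'n', 't'],
   ['m', 'e', 'd', 'i', 'c', 'a', 'l', ' ', 'o', 'f', 'f', 'i', 'c', 'e', 'r'],
   ['h', 'e', 'a', 'l', 't', 'h', ' ', 'o', 'f', 'f', 'i', 'c', 'e', 'r'],
   ['n', 'u', 'r', 's', 'i', 'n', 'g'],
   ['m', 'i', 'd', 'w', 'i', 'f', 'e'],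
   ['r', 'a', 'd', 'i', 'o', 'g', 'r', 'a', 'p', 'h', 'e', 'r'],
   ['l', 'a', 'b', ' ', 't', 'e', 'c', 'h', 'n', 'i', 'c', 'i', 'a', 'n']],
  [['d', 'e', 'v', 'e', 'l', 'o', 'p', 'e', 'r'],
   ['p', 'r', 'o', 'g', 'r', 'a', 'm', 'm', 'e', 'r'],
   ['s', 'o', 'f', 't', 'w', 'a', 'r', 'e'],
   ['I', 'T'],
   ['s', 'y', 's', 't', 'e', 'm'],
   ['n', 'e', 't', 'w', 'o', 'r', 'k'],
   ['d', 'a', 't', 'a', 'b', 'a', 's', 'e'],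
   ['w', 'e', 'b'],
   ['t', 'e', 'c', 'h', 'n', 'o', 'l', 'o', 'g', 'y'],
   ['c', 'o', 'm', 'p', 'u', 't', 'e', 'r'],
   ['d', 'i', 'g', 'i', 't', 'a', 'l'],
   ['c', 'y', 'b', 'e', 'r'],
   ['d', 'a', 't', 'a'],
   ['a', 'n', 'a', 'l', 'y', 's', 't'],
   ['t', 'e', 'c', 'h', 'n', 'i', 'c', 'a', 'l'],
   ['e', 'n', 'g', 'i', 'n', 'e', 'e', 'r'],
   ['c', 'o', 'd', 'i', 'n', 'g'],
   ['p', 'r', 'o', 'g', 'r', 'a', 'm', 'm', 'i', 'n', 'g'],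
   ['j', 'a', 'v', 'a', 's', 'c', 'r', 'i', 'p', 't'],
   ['p', 'y', 't', 'h', 'o', 'n'],
   ['j', 'a', 'v', 'a'],
   ['h', 't', 'm', 'l'],
   ['c', 's', 's']],
  [['t', 'e', 'a', 'c', 'h', 'e', 'r'],
   ['i', 'n', 's', 't', 'r', 'u', 'c', 't', 'o', 'r'],
   ['e', 'd', 'u', 'c', 'a', 't', 'i', 'o', 'n'],
   ['t', 'r', 'a', 'i', 'n', 'i', 'n', 'g'],
   ['a', 'c', 'a', 'd', 'e', 'm', 'i', 'c'],
   ['s', 'c', 'h', 'o', 'o', 'l'],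
   ['u', 'n', 'i', 'v', 'e', 'r', 's', 'i', 't', 'y'],
   ['l', 'e', 'c', 't', 'u', 'r', 'e', 'r'],
   ['p', 'r', 'o', 'f', 'e', 's', 's', 'o', 'r'],
   ['t', 'u', 't', 'o', 'r'],
   ['e', 'd', 'u', 'c', 'a', 't', 'i', 'o', 'n', 'a', 'l'],
   ['c', 'u', 'r', 'r', 'i', 'c', 'u', 'l', 'u', 'm'],
   ['l', 'e', 'a', 'r', 'n', 'i', 'n', 'g'],
   ['s', 't', 'u', 'd', 'e', 'n', 't'],
   ['t', 'e', 'a', 'c', 'h', 'i', 'n', 'g'],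
   ['t', 'r', 'a', 'i', 'n', 'e', 'r'],
   ['f', 'a', 'c', 'i', 'l', 'i', 't', 'a', 't', 'o', 'r']],
  [['a', 'c', 'c', 'o', 'u', 'n', 't', 'a', 'n', 't'],
   ['f', 'i', 'n', 'a', 'n', 'c', 'e'],
   ['b', 'a', 'n', 'k', 'i', 'n', 'g'],
   ['f', 'i', 'n', 'a', 'n', 'c', 'i', 'a', 'l'],
   ['a', 'u', 'd', 'i', 't'],
   ['b', 'u', 'd', 'g', 'e', 't'],
   ['a', 'c', 'c', 'o', 'u', 'n', 't', 'i', 'n', 'g'],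
   ['e', 'c', 'o', 'n', 'o', 'm', 'i', 's', 't'],
   ['t', 'r', 'e', 'a', 's', 'u', 'r', 'e', 'r'],
   ['c', 'a', 's', 'h', 'i', 'e', 'r'],
   ['c', 'r', 'e', 'd', 'i', 't'],
   ['l', 'o', 'a', 'n'],
   ['i', 'n', 'v', 'e', 's', 't', 'm', 'e', 'n', 't'],
   ['t', 'a', 'x'],
   ['b', 'o', 'o', 'k', 'k', 'e', 'e', 'p', 'e', 'r'],
   ['p', 'a', 'y', 'r', 'o', 'l', 'l']],
  [['s', 'a', 'l', 'e', 's'],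
   ['m', 'a', 'r', 'k', 'e', 't', 'i', 'n', 'g'],
   ['m', 'a', 'r', 'k', 'e', 't'],
   ['c', 'u', 's', 't', 'o', 'm', 'e', 'r'],
   ['c', 'l', 'i', 'e', 'n', 't'],
   ['b', 'u', 's', 'i', 'n', 'e', 's', 's', ' ', 'd', 'e', 'v', 'e', 'l', 'o', 'p', 'm', 'e', 'n', 't'],
   ['p', 'r', 'o', 'm', 'o', 't', 'i', 'o', 'n'],
   ['a', 'd', 'v', 'e', 'r', 't', 'i', 's', 'i', 'n', 'g'],
   ['b', 'r', 'a', 'n', 'd'],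
   ['r', 'e', 't', 'a', 'i', 'l'],
   ['c', 'o', 'm', 'm', 'e', 'r', 'c', 'i', 'a', 'l'],
   ['r', 'e', 'v', 'e', 'n', 'u', 'e'],
   ['t', 'a', 'r', 'g', 'e', 't'],
   ['c', 'a', 'm', 'p', 'a', 'i', 'g', 'n']],
  [['h', 'u', 'm', 'a', 'n', ' ', 'r', 'e', 's', 'o', 'u', 'r', 'c', 'e', 's'],
   ['H', 'R'],
   ['r', 'e', 'c', 'r', 'u', 'i', 't', 'm', 'e', 'n', 't'],
   ['t', 'a', 'l', 'e', 'n', 't'],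
   ['p', 'e', 'r', 's', 'o', 'n', 'n', 'e', 'l'],
   ['e', 'm', 'p', 'l', 'o', 'y', 'e', 'e'],
   ['p', 'a', 'y', 'r', 'o', 'l', 'l'],
   ['b', 'e', 'n', 'e', 'f', 'i', 't', 's'],
   ['c', 'o', 'm', 'p', 'e', 'n', 's', 'a', 't', 'i', 'o', 'n'],
   ['t', 'r', 'a', 'i', 'n', 'i', 'n', 'g', ' ', 'c', 'o', 'o', 'r', 'd', 'i', 'n', 'a', 't', 'o', 'r'],
   ['p', 'e', 'o', 'p', 'l', 'e'],
   ['w', 'o', 'r', 'k', 'f', 'o', 'r', 'c', 'e']],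
  [['e', 'n', 'g', 'i', 'n', 'e', 'e', 'r'],
   ['e', 'n', 'g', 'i', 'n', 'e', 'e', 'r', 'i', 'n', 'g'],
   ['m', 'e', 'c', 'h', 'a', 'n', 'i', 'c', 'a', 'l'],
   ['e', 'l', 'e', 'c', 't', 'r', 'i', 'c', 'a', 'l'],
   ['c', 'i', 'v', 'i', 'l'],
   ['c', 'o', 'n', 's', 't', 'r', 'u', 'c', 't', 'i', 'o', 'n'],
   ['a', 'r', 'c', 'h', 'i', 't', 'e', 'c', 't'],
   ['t', 'e', 'c', 'h', 'n', 'i', 'c', 'a', 'l'],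
   ['m', 'a', 'i', 'n', 't', 'e', 'n', 'a', 'n', 'c', 'e'],
   ['r', 'e', 'p', 'a', 'i', 'r'],
   ['i', 'n', 's', 't', 'a', 'l', 'l', 'a', 't', 'i', 'o', 'n'],
   ['i', 'n', 'f', 'r', 'a', 's', 't', 'r', 'u', 'c', 't', 'u', 'r', 'e'],
   ['p', 'r', 'o', 'j', 'e', 'c', 't', ' ', 'e', 'n', 'g', 'i', 'n', 'e', 'e', 'r']],
  [['a', 'd', 'm', 'i', 'n', 'i', 's', 't', 'r', 'a', 't', 'o', 'r'],
   ['a', 'd', 'm', 'i', 'n'],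
   ['s', 'e', 'c', 'r', 'e', 't', 'a', 'r', 'y'],
   ['c', 'l', 'e', 'r', 'k'],
   ['a', 's', 's', 'i', 's', 't', 'a', 'n', 't'],
   ['r', 'e', 'c', 'e', 'p', 't', 'i', 'o', 'n', 'i', 's', 't'],
   ['o', 'f', 'f', 'i', 'c', 'e'],
   ['a', 'd', 'm', 'i', 'n', 'i', 's', 't', 'r', 'a', 't', 'i', 'v', 'e'],
   ['c', 'o', 'o', 'r', 'd', 'i', 'n', 'a', 't', 'o', 'r'],
   ['s', 'u', 'p', 'p', 'o', 'r', 't'],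
   ['d', 'a', 't', 'a', ' ', 'e', 'n', 't', 'r', 'y'],
   ['f', 'i', 'l', 'i', 'n', 'g']],
  [['m', 'a', 'n', 'a', 'g', 'e', 'r'],
   ['d', 'i', 'r', 'e', 'c', 't', 'o', 'r'],
   ['s', 'u', 'p', 'e', 'r', 'v', 'i', 's', 'o', 'r'],
   ['h', 'e', 'a', 'd'],
   ['c', 'h', 'i', 'e', 'f'],
   ['e', 'x', 'e', 'c', 'u', 't', 'i', 'v', 'e'],
   ['l', 'e', 'a', 'd', 'e', 'r', 's', 'h', 'i', 'p'],
   ['t', 'e', 'a', 'm', ' ', 'l', 'e', 'a', 'd'],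
   ['s', 'e', 'n', 'i', 'o', 'r'],
   ['m', 'a', 'n', 'a', 'g', 'e', 'm', 'e', 'n', 't'],
   ['o', 'p', 'e', 'r', 'a', 't', 'i', 'o', 'n', 's'],
   ['s', 't', 'r', 'a', 't', 'e', 'g', 'i', 'c'],
   ['p', 'l', 'a', 'n', 'n', 'i', 'n', 'g'],
   ['C', 'E', 'O'],
   ['C', 'O', 'O'],
   ['C', 'F', 'O']],
  [['a', 'g', 'r', 'i', 'c', 'u', 'l', 't', 'u', 'r', 'e'],
   ['f', 'a', 'r', 'm', 'i', 'n', 'g'],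
   ['f', 'a', 'r', 'm', 'e', 'r'],
   ['a', 'g', 'r', 'i', 'c', 'u', 'l', 't', 'u', 'r', 'a', 'l'],
   ['c', 'r', 'o', 'p'],
   ['l', 'i', 'v', 'e', 's', 't', 'o', 'c', 'k'],
   ['v', 'e', 't', 'e', 'r', 'i', 'n', 'a', 'r', 'y'],
   ['a', 'g', 'r', 'o', 'n', 'o', 'm', 'y'],
   ['i', 'r', 'r', 'i', 'g', 'a', 't', 'i', 'o', 'n'],
   ['r', 'u', 'r', 'a', 'l'],
   ['e', 'x', 't', 'e', 'n', 's', 'i', 'o', 'n', ' ', 'o', 'f', 'f', 'i', 'c', 'e', 'r']],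
  [['l', 'a', 'w', 'y', 'e', 'r'],
   ['l', 'e', 'g', 'a', 'l'],
   ['a', 't', 't', 'o', 'r', 'n', 'e', 'y'],
   ['l', 'a', 'w'],
   ['c', 'o', 'u', 'r', 't'],
   ['j', 'u', 'd', 'i', 'c', 'i', 'a', 'l'],
   ['l', 'e', 'g', 'a', 'l', ' ', 'o', 'f', 'f', 'i', 'c', 'e', 'r'],
   ['p', 'a', 'r', 'a', 'l', 'e', 'g', 'a', 'l'],
   ['c', 'o', 'm', 'p', 'l', 'i', 'a', 'n', 'c', 'e'],
   ['c', 'o', 'n', 't', 'r', 'a', 'c', 't'],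
   ['l', 'i', 't', 'i', 'g', 'a', 't', 'i', 'o', 'n']],
  [['N', 'G', 'O'],
   ['d', 'e', 'v', 'e', 'l', 'o', 'p', 'm', 'e', 'n', 't'],
   ['c', 'o', 'm', 'm', 'u', 'n', 'i', 't', 'y'],
   ['s', 'o', 'c', 'i', 'a', 'l'],
   ['h', 'u', 'm', 'a', 'n', 'i', 't', 'a', 'r', 'i', 'a', 'n'],
   ['v', 'o', 'l', 'u', 'n', 't', 'e', 'e', 'r'],
   ['n', 'o', 'n', 'p', 'r', 'o', 'f', 'i', 't'],
   ['c', 'h', 'a', 'r', 'i', 't', 'y'],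
   ['a', 'i', 'd'],
   ['r', 'e', 'l', 'i', 'e', 'f'],
   ['d', 'o', 'n', 'o', 'r'],
   ['g', 'r', 'a', 'n', 't'],
   ['p', 'r', 'o', 'j', 'e', 'c', 't', ' ', 'o', 'f', 'f', 'i', 'c', 'e', 'r']],
  [['c', 'o', 'n', 's', 'u', 'l', 't', 'a', 'n', 't'],
   ['c', 'o', 'n', 's', 'u', 'l', 't', 'i', 'n', 'g'],
   ['a', 'd', 'v', 'i', 's', 'o', 'r', 'y'],
   ['e', 'x', 'p', 'e', 'r', 't'],
   ['s', 'p', 'e', 'c', 'i', 'a', 'l', 'i', 's', 't'],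
   ['f', 'r', 'e', 'e', 'l', 'a', 'n', 'c', 'e'],
   ['c', 'o', 'n', 't', 'r', 'a', 'c', 't', 'o', 'r'],
   ['c', 'o', 'n', 's', 'u', 'l', 't', 'a', 'n', 'c', 'y'],
   ['e', 'x', 'p', 'e', 'r', 't', 'i', 's', 'e']],
  [['d', 'r', 'i', 'v', 'e', 'r'],
   ['t', 'r', 'a', 'n', 's', 'p', 'o', 'r', 't'],
   ['l', 'o', 'g', 'i', 's', 't', 'i', 'c', 's'],
   ['d', 'e', 'l', 'i', 'v', 'e', 'r', 'y'],
   ['s', 'h', 'i', 'p', 'p', 'i', 'n', 'g'],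
   ['w', 'a', 'r', 'e', 'h', 'o', 'u', 's', 'e'],
   ['s', 'u', 'p', 'p', 'l', 'y', ' ', 'c', 'h', 'a', 'i', 'n'],
   ['d', 'i', 's', 't', 'r', 'i', 'b', 'u', 't', 'i', 'o', 'n'],
   ['f', 'l', 'e', 'e', 't'],
   ['c', 'a', 'r', 'g', 'o']],
  [['s', 'e', 'c', 'u', 'r', 'i', 't', 'y'],
   ['g', 'u', 'a', 'r', 'd'],
   ['p', 'r', 'o', 't', 'e', 'c', 't', 'i', 'o', 'n'],
   ['s', 'a', 'f', 'e', 't', 'y'],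
   ['s', 'u', 'r', 'v', 'e', 'i', 'l', 'l', 'a', 'n', 'c', 'e'],
   ['r', 'i', 's', 'k'],
   ['e', 'm', 'e', 'r', 'g', 'e', 'n', 'c', 'y']]]

-- module-level build of _KW_INDEX: keyword → earliest category index (dict as assoc list)
def pvAddKw (d : List (List Char × Nat)) (ci : Nat) (kw : List Char) : List (List Char × Nat) :=
  if (d.lookup kw).isSome then d else d ++ [(kw, ci)]

def pvKwIndex : List (List Char × Nat) :=
  pvCatKws.zipIdx.foldl (fun d e => e.1.foldl (fun d kw => pvAddKw d e.2 kw) d) []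

-- sorted({len(kw) for kw in _KW_INDEX})
def pvLengths : List Nat :=
  PySem.List.sorted (PySem.Set.ofList (pvKwIndex.map (fun p => p.1.length))) (fun x => x)

-- inner 'for L in _KW_LENGTHS' body; text[i:i+L] with 0 ≤ i, 0 ≤ L is exactly take L (drop i)
def pvInner (text : List Char) (i : Nat) (b : Nat) : Nat :=
  pvLengths.foldl (fun b L =>
    match pvKwIndex.lookup ((text.drop i).take L) with
    | some ci => if ci < b then ci else b
    | none => b) b

def classify_job_category_alt (title : String) (description : String) (company : String) : String :=
  -- "\n".join of the three lowered strings, kept as a char list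
  let text := (PySem.Str.lower title).toList ++ '\n' :: ((PySem.Str.lower description).toList ++ '\n' :: (PySem.Str.lower company).toList)
  -- 'if best == 0: break': once best is 0 every remaining iteration is skipped
  let best := (List.range text.length).foldl (fun b i => if b == 0 then b else pvInner text i b) 15
  -- _CATEGORY_NAMES[best]: best ≤ 15 always, so the default is unreachable
  pvNames.getD best "Other"

-- ===== PRECONDITION & SPEC =====
def Spec_classify_job_category (title : String) (description : String) (company : String) (out : String) : Prop := out = classify_job_category_alt title description company
instance (title : String) (description : String) (company : String) (out : String) : Decidable (Spec_classify_job_category title description company out) := by unfold Spec_classify_job_category; infer_instance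

-- ===== CLAIM (what is proved, stated in full; the proofs are below) =====
def Claim_equal_classify_job_category : Prop := ∀ (title : String) (description : String) (company : String), Dom_classify_job_category title description company → Spec_classify_job_category title description company (classify_job_category title description company)


-- ===== LEMMAS AND PROOFS =====

-- the combined text B scans
def pvText (tl dl cl : List Char) : List Char := tl ++ '\n' :: (dl ++ '\n' :: cl)

-- min-fold toolkit
def pvMF (a : Nat) (ws : List Nat) : Nat := ws.foldl min a

theorem pvMF_le_init (a : Nat) (ws : List Nat) : pvMF a ws ≤ a := by
  induction ws generalizing a with
  | nil => simp [pvMF]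
  | cons w ws ih => exact le_trans (ih (min a w)) (Nat.min_le_left a w)

theorem pvMF_le_mem {v : Nat} {ws : List Nat} (a : Nat) (h : v ∈ ws) : pvMF a ws ≤ v := by
  induction ws generalizing a with
  | nil => cases h
  | cons w ws ih =>
    rcases List.mem_cons.mp h with rfl | h'
    · exact le_trans (pvMF_le_init (min a v) ws) (Nat.min_le_right a v)
    · exact ih (min a w) h'

theorem pvMF_cases (a : Nat) (ws : List Nat) : pvMF a ws = a ∨ pvMF a ws ∈ ws := by
  induction ws generalizing a with
  | nil => left; rfl
  | cons w ws ih =>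
    have hh : pvMF a (w :: ws) = pvMF (min a w) ws := rfl
    rcases ih (min a w) with h | h
    · rcases Nat.le_total a w with hle | hle
      · left; rw [hh, h, Nat.min_eq_left hle]
      · right; rw [hh, h, Nat.min_eq_right hle]; exact List.mem_cons_self
    · right; exact List.mem_cons_of_mem _ h

-- separator splitting: a keyword without the separator matches the joined text
-- iff it matches one of the parts
theorem pv_infix_sep {kw a b : List Char} (h : '\n' ∉ kw) :
    kw <:+: (a ++ '\n' :: b) ↔ kw <:+: a ∨ kw <:+: b := by
  constructor
  · rintro ⟨s, t, e⟩
    rw [List.append_assoc] at e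
    have hd : kw ++ t = (a ++ '\n' :: b).drop s.length := by
      rw [← e, List.drop_left' rfl]
    rcases Nat.lt_or_ge a.length s.length with hc | hc
    · right
      rw [List.drop_append, List.drop_eq_nil_of_le (le_of_lt hc), List.nil_append] at hd
      obtain ⟨k, hk⟩ : ∃ k, s.length - a.length = k + 1 := ⟨s.length - a.length - 1, by omega⟩
      rw [hk, List.drop_succ_cons] at hd
      have hp : kw <+: b.drop k := hd ▸ List.prefix_append kw t
      exact hp.isInfix.trans (List.drop_suffix _ _).isInfix
    · rcases Nat.lt_or_ge a.length (s.length + kw.length) with hc2 | hc2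
      · exfalso
        apply h
        have hl : a.length < (s ++ (kw ++ t)).length := by rw [e]; simp
        have e1 : (s ++ (kw ++ t))[a.length]'hl = '\n' := by
          have hr : (a ++ '\n' :: b)[a.length]'(e ▸ hl) = '\n' := by
            simp [List.getElem_append_right (Nat.le_refl a.length)]
          exact (List.getElem_of_eq e hl).trans hr
        have e2 : (s ++ (kw ++ t))[a.length]'hl = kw[a.length - s.length]'(by omega) := by
          rw [List.getElem_append_right hc, List.getElem_append_left (by omega)]
        rw [e2] at e1
        exact e1 ▸ List.getElem_mem _
      · left
        rw [List.drop_append_of_le_length hc] at hd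
        have hp : kw <+: a.drop s.length ++ '\n' :: b := hd ▸ List.prefix_append kw t
        have h4 := List.prefix_iff_eq_take.mp hp
        rw [List.take_append_of_le_length (by simp; omega)] at h4
        exact (h4 ▸ List.take_prefix _ _).isInfix.trans (List.drop_suffix _ _).isInfix
  · rintro (⟨s, t, e⟩ | ⟨s, t, e⟩)
    · exact ⟨s, t ++ '\n' :: b, by rw [← e]; simp⟩
    · exact ⟨a ++ '\n' :: s, t, by rw [← e]; simp⟩

-- facts about the concrete tables (kernel-evaluated)
set_option maxRecDepth 100000 in
theorem pvF : ∀ p ∈ pvKwIndex, pvKwIndex.lookup p.1 = some p.2 ∧ p.1 ≠ [] ∧ '\n' ∉ p.1 ∧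
    p.1.length ∈ pvLengths ∧ p.2 < 15 ∧ p.1 ∈ pvCatKws.getD p.2 [] := by decide

set_option maxRecDepth 100000 in
theorem pvF2b : ∀ j (hj : j < pvCatKws.length), ∀ kw ∈ pvCatKws[j], ((pvKwIndex.lookup kw).map (fun ci => decide (ci ≤ j))).getD false = true := by decide

theorem pvF2 (j : Nat) (kw : List Char) (hkw : kw ∈ pvCatKws.getD j []) :
    ∃ ci, pvKwIndex.lookup kw = some ci ∧ ci ≤ j := by
  by_cases hj : j < pvCatKws.length
  · rw [List.getD_eq_getElem pvCatKws [] hj] at hkw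
    have hb := pvF2b j hj kw hkw
    cases hlk : pvKwIndex.lookup kw with
    | none => rw [hlk] at hb; simp at hb
    | some ci => rw [hlk] at hb; simp at hb; exact ⟨ci, rfl, hb⟩
  · rw [List.getD_eq_default pvCatKws [] (by omega)] at hkw
    cases hkw

set_option maxRecDepth 100000 in
theorem pvF3 : ∀ j (hj : j < (pvCatList.take 15).length),
    (((pvCatList.take 15)[j]'hj).2.map String.toList) = pvCatKws.getD j [] := by decide

theorem pvF4 : ∀ j (hj : j < (pvCatList.take 15).length),
    ((pvCatList.take 15)[j]'hj).1 = pvNames.getD (0 + j) "Other" ∧ ((pvCatList.take 15)[j]'hj).1 ≠ "Other" := by decide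

theorem pvLookup_facts {k : List Char} {ci : Nat} (h : pvKwIndex.lookup k = some ci) :
    k ≠ [] ∧ '\n' ∉ k ∧ k.length ∈ pvLengths ∧ ci < 15 ∧ k ∈ pvCatKws.getD ci [] := by
  rcases List.lookup_eq_some_iff.mp h with ⟨l1, l2, he, -⟩
  have hm : (k, ci) ∈ pvKwIndex := by rw [he]; simp
  have := pvF _ hm
  exact ⟨this.2.1, this.2.2.1, this.2.2.2.1, this.2.2.2.2.1, this.2.2.2.2.2⟩

-- candidate value inspected by B at position i with length L
def pvVal (text : List Char) (i L : Nat) : Nat :=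
  (pvKwIndex.lookup ((text.drop i).take L)).getD 15

def pvCand (text : List Char) : List Nat :=
  (List.range text.length).flatMap (fun i => pvLengths.map (pvVal text i))

theorem pvInner_gen (text : List Char) (i : Nat) :
    ∀ (ls : List Nat) (b : Nat), b ≤ 15 →
    ls.foldl (fun b L =>
      match pvKwIndex.lookup ((text.drop i).take L) with
      | some ci => if ci < b then ci else b
      | none => b) b = pvMF b (ls.map (pvVal text i)) := by
  intro ls
  induction ls with
  | nil => intro b hb; simp [pvMF]
  | cons L ls ih =>
    intro b hb
    have hstep : (match pvKwIndex.lookup ((text.drop i).take L) with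
        | some ci => if ci < b then ci else b | none => b) = min b (pvVal text i L) := by
      simp only [pvVal]
      cases hlk : pvKwIndex.lookup ((text.drop i).take L) with
      | none => simp only [Option.getD_none]; omega
      | some ci =>
        have hci := (pvLookup_facts hlk).2.2.2.1
        simp only [Option.getD_some]
        split_ifs with hlt <;> omega
    simp only [List.foldl_cons, List.map_cons]
    rw [hstep, ih (min b (pvVal text i L)) (le_trans (Nat.min_le_left _ _) hb)]
    simp [pvMF]

set_option maxRecDepth 100000 in
theorem pvInner_eq {b : Nat} (text : List Char) (i : Nat) (hb : b ≤ 15) :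
    pvInner text i b = pvMF b (pvLengths.map (pvVal text i)) :=
  pvInner_gen text i pvLengths b hb

theorem pvMF_zero (ws : List Nat) : pvMF 0 ws = 0 :=
  Nat.le_zero.mp (pvMF_le_init 0 ws)

theorem pvMF_append (a : Nat) (xs ys : List Nat) : pvMF a (xs ++ ys) = pvMF (pvMF a xs) ys :=
  List.foldl_append

theorem pvOuter_gen (text : List Char) :
    ∀ (idxs : List Nat) (b : Nat), b ≤ 15 →
    idxs.foldl (fun b i => if b == 0 then b else pvInner text i b) b
      = pvMF b (idxs.flatMap (fun i => pvLengths.map (pvVal text i))) := by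
  intro idxs
  induction idxs with
  | nil => intro b hb; simp [pvMF]
  | cons i idxs ih =>
    intro b hb
    simp only [List.foldl_cons, List.flatMap_cons]
    by_cases h0 : b = 0
    · subst h0
      rw [if_pos (show ((0 : Nat) == 0) = true from rfl), ih 0 (by omega), pvMF_zero, pvMF_append, pvMF_zero, pvMF_zero]
    · rw [if_neg (by simpa using h0), pvInner_eq text i hb,
        ih _ (le_trans (pvMF_le_init _ _) hb), pvMF_append]

theorem pvOuter_eq (text : List Char) :
    (List.range text.length).foldl (fun b i => if b == 0 then b else pvInner text i b) 15
      = pvMF 15 (pvCand text) :=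
  pvOuter_gen text (List.range text.length) 15 (by omega)

theorem pvCand_spec {text : List Char} {v : Nat} (h : v ∈ pvCand text) :
    v = 15 ∨ ∃ kw, pvKwIndex.lookup kw = some v ∧ kw <:+: text := by
  rcases List.mem_flatMap.mp h with ⟨i, _, hv⟩
  rcases List.mem_map.mp hv with ⟨L, _, rfl⟩
  cases hlk : pvKwIndex.lookup ((text.drop i).take L) with
  | none => left; simp only [pvVal, hlk, Option.getD_none]
  | some ci =>
    right
    exact ⟨(text.drop i).take L, by simp only [pvVal, hlk, Option.getD_some],
      (List.take_prefix _ _).isInfix.trans (List.drop_suffix _ _).isInfix⟩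

theorem pvCand_complete {text : List Char} {kw : List Char} {ci : Nat}
    (h : pvKwIndex.lookup kw = some ci) (hin : kw <:+: text) : ci ∈ pvCand text := by
  obtain ⟨hne, _, hlen, _, _⟩ := pvLookup_facts h
  rcases hin with ⟨s, t, e⟩
  have hk : kw.length ≠ 0 := fun hz => hne (List.length_eq_zero_iff.mp hz)
  have hi : s.length < text.length := by
    have hle := congrArg List.length e
    simp at hle
    omega
  have hdrop : text.drop s.length = kw ++ t := by
    rw [← e, List.append_assoc, List.drop_left' rfl]
  have htake : (text.drop s.length).take kw.length = kw := by
    rw [hdrop, List.take_left' rfl]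
  exact List.mem_flatMap.mpr ⟨s.length, List.mem_range.mpr hi,
    List.mem_map.mpr ⟨kw.length, hlen, by simp only [pvVal, htake, h, Option.getD_some]⟩⟩

-- A's inner loop as an 'any' over the char-level keywords
theorem pvAnyHit_eq (kws : List String) (tl dl cl : String) :
    pvAnyHit kws tl dl cl = (kws.map String.toList).any
      (fun kw => PySem.Chars.isIn kw tl.toList || PySem.Chars.isIn kw dl.toList || PySem.Chars.isIn kw cl.toList) := by
  induction kws with
  | nil => rfl
  | cons k ks ih =>
    simp only [pvAnyHit, List.map_cons, List.any_cons, ← ih, PySem.Str.isIn_eq]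
    by_cases h : (PySem.Chars.isIn k.toList tl.toList || PySem.Chars.isIn k.toList dl.toList
        || PySem.Chars.isIn k.toList cl.toList) = true
    · simp [h]
    · rw [Bool.not_eq_true] at h
      simp [h]

-- generic first-match induction relating A's cascade to the minimal index m
theorem pvMain (tl dl cl : String) (m : Nat) :
    ∀ (T : List (String × List String)) (off : Nat),
    off + T.length ≤ 15 →
    (∀ j (hj : j < T.length), (T[j]'hj).1 = pvNames.getD (off + j) "Other" ∧ (T[j]'hj).1 ≠ "Other") →
    (∀ j (hj : j < T.length), pvAnyHit (T[j]'hj).2 tl dl cl = true → m ≤ off + j) →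
    (∀ j (hj : j < T.length), m = off + j → pvAnyHit (T[j]'hj).2 tl dl cl = true) →
    (m < 15 → off ≤ m) →
    (m < 15 → m < off + T.length) →
    pvLoopA (T ++ [("Other", [])]) tl dl cl = pvNames.getD m "Other" := by
  intro T
  induction T with
  | nil =>
    intro off _ _ _ _ h4 h5
    have hm : 15 ≤ m := by
      by_contra hlt
      have ha := h4 (by omega)
      have hb := h5 (by omega)
      simp at hb
      omega
    have hrhs : pvNames.getD m "Other" = "Other" := by
      rcases Nat.eq_or_lt_of_le hm with he | hlt
      · rw [← he]; decide
      · exact List.getD_eq_default pvNames "Other" (by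
          have : pvNames.length = 16 := by decide
          omega)
    rw [hrhs]
    rfl
  | cons hd rest ih =>
    obtain ⟨n, ks⟩ := hd
    intro off hlen h1 h2 h3 h4 h5
    have hn := h1 0 (by simp)
    simp only [List.getElem_cons_zero, Nat.add_zero] at hn
    have hloop : pvLoopA (((n, ks) :: rest) ++ [("Other", [])]) tl dl cl
        = if pvAnyHit ks tl dl cl then n else pvLoopA (rest ++ [("Other", [])]) tl dl cl := by
      show (if n == "Other" then _ else _) = _
      rw [if_neg (by simpa using hn.2)]
      exact rfl
    rw [hloop]
    cases hAny : pvAnyHit ks tl dl cl with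
    | true =>
      rw [if_pos rfl]
      have hm_le : m ≤ off := by simpa using h2 0 (by simp) hAny
      have hm_lt : m < 15 := by simp at hlen; omega
      have hm : m = off := le_antisymm hm_le (h4 hm_lt)
      rw [hn.1, hm]
    | false =>
      rw [if_neg (by simp)]
      apply ih (off + 1)
      · simp at hlen ⊢; omega
      · intro j hj
        have := h1 (j + 1) (by simp; omega)
        simpa [Nat.add_assoc, Nat.add_comm 1 j] using this
      · intro j hj hA
        have h := h2 (j + 1) (by simp; omega) (by simpa using hA)
        omega
      · intro j hj hm
        have := h3 (j + 1) (by simp; omega) (by omega)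
        simpa using this
      · intro hlt
        have hoff := h4 hlt
        rcases Nat.lt_or_ge m (off + 1) with hx | hx
        · exfalso
          have hm0 : m = off + 0 := by omega
          have := h3 0 (by simp) hm0
          simp only [List.getElem_cons_zero] at this
          rw [this] at hAny
          cases hAny
        · exact hx
      · intro hlt
        have := h5 hlt
        simp at this ⊢
        omega

theorem pvFinal (tl dl cl : String) :
    pvLoopA pvCatList tl dl cl
      = pvNames.getD ((List.range (pvText tl.toList dl.toList cl.toList).length).foldl
          (fun b i => if b == 0 then b else pvInner (pvText tl.toList dl.toList cl.toList) i b) 15) "Other" := by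
  rw [pvOuter_eq]
  set text := pvText tl.toList dl.toList cl.toList with htext
  set m := pvMF 15 (pvCand text) with hm
  have hsep : ∀ kw : List Char, '\n' ∉ kw →
      (kw <:+: text ↔ (PySem.Chars.isIn kw tl.toList || PySem.Chars.isIn kw dl.toList
        || PySem.Chars.isIn kw cl.toList) = true) := by
    intro kw hk
    rw [htext]
    unfold pvText
    rw [pv_infix_sep hk, pv_infix_sep hk]
    simp [PySem.Chars.isIn_iff_infix, or_assoc]
  have hT : (pvCatList.take 15).length = 15 := by decide
  have h2 : ∀ j (hj : j < (pvCatList.take 15).length),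
      pvAnyHit ((pvCatList.take 15)[j]'hj).2 tl dl cl = true → m ≤ 0 + j := by
    intro j hj hA
    rw [pvAnyHit_eq] at hA
    rcases List.any_eq_true.mp hA with ⟨kw, hkw, hp⟩
    rw [pvF3 j hj] at hkw
    obtain ⟨ci, hlk, hcj⟩ := pvF2 j kw hkw
    have hnl := (pvLookup_facts hlk).2.1
    have htxt : kw <:+: text := (hsep kw hnl).mpr hp
    have hle := pvMF_le_mem 15 (pvCand_complete hlk htxt)
    omega
  have h3 : ∀ j (hj : j < (pvCatList.take 15).length),
      m = 0 + j → pvAnyHit ((pvCatList.take 15)[j]'hj).2 tl dl cl = true := by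
    intro j hj hmj
    have hj15 : j < 15 := by omega
    have hmlt : m < 15 := by omega
    rcases pvMF_cases 15 (pvCand text) with hc | hc
    · omega
    · rcases pvCand_spec hc with h15 | ⟨kw, hlk, htxt⟩
      · omega
      · obtain ⟨-, hnl, -, -, hmem⟩ := pvLookup_facts hlk
        rw [pvAnyHit_eq]
        apply List.any_eq_true.mpr
        refine ⟨kw, ?_, (hsep kw hnl).mp htxt⟩
        rw [pvF3 j hj]
        have hjm : j = m := by omega
        rw [hjm]
        exact hmem
  have hsplit : pvCatList = pvCatList.take 15 ++ [("Other", [])] := by decide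
  rw [hsplit]
  exact pvMain tl dl cl m (pvCatList.take 15) 0 (by rw [hT]) pvF4 h2 h3
    (fun _ => Nat.zero_le m) (fun _ => by rw [hT]; omega)

-- ===== VERDICT (by name: the statement is the Claim_ definition above) =====
theorem classify_job_category_spec : Claim_equal_classify_job_category := by
  intro title description company _
  show classify_job_category title description company
      = classify_job_category_alt title description company
  unfold classify_job_category classify_job_category_alt
  exact pvFinal (PySem.Str.lower title) (PySem.Str.lower description) (PySem.Str.lower company)
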